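-- pv_equiv track=rewrite | github.com/aralfaruqi/alteraproject | Basic Programming/Problem 3/2 - Target Terdekat.py | targetTerdekat
-- ===== SOURCE A (Python) =====
-- def targetTerdekat(arr): # asumsi input array hanya 'x',' ', dan 'o'
--     index_x = []
--     index_o = []
--
--     for i in range(len(arr)): # looping untuk isi list index tiap x dan o ada dimana
--         if arr[i] == 'x':
--             index_x.append(i)
--         elif arr[i] == 'o':
--             index_o.append(i)
--
--     if index_x == [] or index_o == []: # jika x atau o tidak ditemukan maka return 0
--         return 0
--
--     index_xo = []
--     for i in index_x: # Looping untuk mengisi list jarak spasi antar karakter x dan o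
--         for n in index_o:
--             y = i-n
--             if y<0:
--                 y = (i-n)*(-1)
--             index_xo.append(y)
--
--     minimum = index_xo[0]
--
--     for i in range(len(index_xo)): # # mencari nilai minimum dari list jarak spasi x dan o
--         if index_xo[i] < minimum:
--             minimum = index_xo[i]
--
--     return minimum
-- ===== SOURCE B (Python) =====
-- def targetTerdekat(arr):  # single pass: track last-seen 'x' and 'o', update best distance
--     last_x = None
--     last_o = None
--     best = None
--     for i in range(len(arr)):
--         c = arr[i]
--         if c == 'x':
--             last_x = i
--             if last_o is not None:
--                 d = i - last_o
--                 if best is None or d < best: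
--                     best = d
--         elif c == 'o':
--             last_o = i
--             if last_x is not None:
--                 d = i - last_x
--                 if best is None or d < best:
--                     best = d
--     return 0 if best is None else best
-- ===== Notes on version B (the rewrite author's own statement) =====
-- stated objective: alternative
-- what changed: Replaced the build-all-pairwise-distances-then-scan-for-minimum approach (a nested loop over all x-positions times all o-positions plus a separate minimum scan) by a single left-to-right pass that tracks the last-seen 'x' and 'o' indices and updates a running minimum distance.
import Mathlib
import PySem

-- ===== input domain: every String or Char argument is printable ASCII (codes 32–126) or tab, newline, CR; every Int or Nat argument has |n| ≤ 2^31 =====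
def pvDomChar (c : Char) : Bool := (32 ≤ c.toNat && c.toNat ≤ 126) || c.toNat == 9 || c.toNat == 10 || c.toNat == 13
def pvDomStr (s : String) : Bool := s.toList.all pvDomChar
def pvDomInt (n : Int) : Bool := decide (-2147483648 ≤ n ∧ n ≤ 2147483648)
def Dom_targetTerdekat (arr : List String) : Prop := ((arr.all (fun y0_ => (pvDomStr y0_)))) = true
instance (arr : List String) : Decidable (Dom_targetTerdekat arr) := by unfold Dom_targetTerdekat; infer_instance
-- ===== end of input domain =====

-- B replaces A's all-pairs distance list + minimum scan by a single pass that tracks the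
-- last-seen 'x' and 'o' indices and keeps a running minimum distance.

-- ===== PORT A =====
-- A's first loop: collect the indices of 'x' and of 'o'
def pvStepA (st : List Int × List Int) (p : Int × String) : List Int × List Int :=
  if p.2 == "x" then (st.1 ++ [p.1], st.2)
  else if p.2 == "o" then (st.1, st.2 ++ [p.1])
  else st

def targetTerdekat (arr : List String) : Int :=
  let st := (PySem.List.enumerate arr).foldl pvStepA ([], [])
  let index_x := st.1
  let index_o := st.2
  if index_x = [] ∨ index_o = [] then 0
  else
    -- nested loop: all pairwise distances
    let index_xo := index_x.foldl
      (fun acc i => index_o.foldl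
        (fun acc n =>
          let y := i - n
          let y := if y < 0 then (i - n) * (-1) else y
          acc ++ [y]) acc) []
    -- minimum scan seeded with index_xo[0] (index_xo is nonempty here, both index lists being nonempty)
    match index_xo with
    | [] => 0
    | h :: _ => index_xo.foldl (fun m y => if y < m then y else m) h

-- ===== PORT B =====
-- B's running-minimum update: 'if best is None or d < best: best = d' (d = i - last)
def pvBestUpd (last b : Option Int) (i : Int) : Option Int :=
  match last with
  | none => b
  | some m =>
      let d := i - m
      match b with
      | none => some d
      | some bb => if d < bb then some d else some bb

-- B's single pass: state = (last_x, last_o, best)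
def pvStepB (st : Option Int × Option Int × Option Int) (p : Int × String) :
    Option Int × Option Int × Option Int :=
  if p.2 == "x" then (some p.1, st.2.1, pvBestUpd st.2.1 st.2.2 p.1)
  else if p.2 == "o" then (st.1, some p.1, pvBestUpd st.1 st.2.2 p.1)
  else st

def targetTerdekat_alt (arr : List String) : Int :=
  let st := (PySem.List.enumerate arr).foldl pvStepB (none, none, none)
  match st.2.2 with
  | none => 0
  | some b => b

-- ===== PRECONDITION & SPEC =====
def Spec_targetTerdekat (arr : List String) (out : Int) : Prop := out = targetTerdekat_alt arr
instance (arr : List String) (out : Int) : Decidable (Spec_targetTerdekat arr out) := by unfold Spec_targetTerdekat; infer_instance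

-- ===== CLAIM (what is proved, stated in full; the proofs are below) =====
def Claim_equal_targetTerdekat : Prop := ∀ (arr : List String), Dom_targetTerdekat arr → Spec_targetTerdekat arr (targetTerdekat arr)

-- ===== LEMMAS AND PROOFS =====

-- the list of all pairwise distances, in A's order
def pvDists (X O : List Int) : List Int := X.flatMap (fun i => O.map (fun n => |i - n|))

-- "l = some m with m the maximum of L, or l = none and L is empty"
def pvMaxOf (l : Option Int) (L : List Int) : Prop :=
  match l with
  | none => L = []
  | some m => m ∈ L ∧ ∀ y ∈ L, y ≤ m

theorem pv_mem_dists {y : Int} {X O : List Int} :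
    y ∈ pvDists X O ↔ ∃ i ∈ X, ∃ n ∈ O, y = |i - n| := by
  simp [pvDists, eq_comm]

theorem pvDists_eq_nil_iff (X O : List Int) : pvDists X O = [] ↔ X = [] ∨ O = [] := by
  simp only [pvDists, List.flatMap_eq_nil_iff, List.map_eq_nil_iff]
  constructor
  · intro h
    by_cases hx : X = []
    · exact Or.inl hx
    · rcases List.exists_mem_of_ne_nil X hx with ⟨x, hxm⟩
      exact Or.inr (h x hxm)
  · rintro (rfl | rfl) <;> simp

theorem pv_min?_congr (L1 L2 : List Int) (h : ∀ y, y ∈ L1 ↔ y ∈ L2) : L1.min? = L2.min? := by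
  cases h1 : L1.min? with
  | none =>
    rw [List.min?_eq_none_iff] at h1
    subst h1
    symm
    rw [List.min?_eq_none_iff]
    cases h2 : L2 with
    | nil => rfl
    | cons a t => exact absurd ((h a).mpr (by simp [h2])) (by simp)
  | some v =>
    rw [List.min?_eq_some_iff] at h1
    symm
    rw [List.min?_eq_some_iff]
    exact ⟨(h v).mp h1.1, fun b hb => h1.2 b ((h b).mpr hb)⟩

theorem pvDists_comm_min? (X O : List Int) : (pvDists X O).min? = (pvDists O X).min? := by
  apply pv_min?_congr
  intro y
  rw [pv_mem_dists, pv_mem_dists]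
  constructor
  · rintro ⟨i, hi, n, hn, rfl⟩; exact ⟨n, hn, i, hi, abs_sub_comm i n⟩
  · rintro ⟨i, hi, n, hn, rfl⟩; exact ⟨n, hn, i, hi, abs_sub_comm i n⟩

-- one update step of the running minimum, against the all-pairs minimum
theorem pv_min_update (X O : List Int) (k : Int) (lo b : Option Int)
    (hO : pvMaxOf lo O) (hOlt : ∀ y ∈ O, y < k)
    (hb : b = (pvDists X O).min?) :
    pvBestUpd lo b k = (pvDists (X ++ [k]) O).min? := by
  unfold pvBestUpd
  cases lo with
  | none =>
    have hO' : O = [] := hO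
    subst hO'
    simpa [pvDists] using hb
  | some m =>
    obtain ⟨hm, hmax⟩ := hO
    have hmk : m < k := hOlt m hm
    have habs : |k - m| = k - m := abs_of_nonneg (by omega)
    cases b with
    | none =>
      have hnil : pvDists X O = [] := List.min?_eq_none_iff.mp hb.symm
      have hX : X = [] := by
        rcases (pvDists_eq_nil_iff X O).mp hnil with h | h
        · exact h
        · exact absurd (h ▸ hm) (List.not_mem_nil)
      subst hX
      symm
      rw [List.min?_eq_some_iff]
      constructor
      · exact pv_mem_dists.mpr ⟨k, by simp, m, hm, habs.symm⟩
      · intro y hy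
        obtain ⟨i, hi, n, hn, rfl⟩ := pv_mem_dists.mp hy
        simp only [List.nil_append, List.mem_singleton] at hi
        have h1 := hmax n hn
        have h2 := hOlt n hn
        have h3 : |i - n| = i - n := abs_of_nonneg (by omega)
        omega
    | some bb =>
      have hb' := hb.symm
      rw [List.min?_eq_some_iff] at hb'
      obtain ⟨hbmem, hbmin⟩ := hb'
      simp only []
      split_ifs with hlt
      · symm
        rw [List.min?_eq_some_iff]
        constructor
        · exact pv_mem_dists.mpr ⟨k, by simp, m, hm, habs.symm⟩
        · intro y hy
          obtain ⟨i, hi, n, hn, rfl⟩ := pv_mem_dists.mp hy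
          rcases List.mem_append.mp hi with hi' | hi'
          · have : bb ≤ |i - n| := hbmin _ (pv_mem_dists.mpr ⟨i, hi', n, hn, rfl⟩)
            omega
          · simp only [List.mem_singleton] at hi'
            have h1 := hmax n hn
            have h2 := hOlt n hn
            have h3 : |i - n| = i - n := abs_of_nonneg (by omega)
            omega
      · symm
        rw [List.min?_eq_some_iff]
        constructor
        · obtain ⟨i, hi, n, hn, hy⟩ := pv_mem_dists.mp hbmem
          exact pv_mem_dists.mpr ⟨i, List.mem_append_left _ hi, n, hn, hy⟩
        · intro y hy
          obtain ⟨i, hi, n, hn, rfl⟩ := pv_mem_dists.mp hy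
          rcases List.mem_append.mp hi with hi' | hi'
          · exact hbmin _ (pv_mem_dists.mpr ⟨i, hi', n, hn, rfl⟩)
          · simp only [List.mem_singleton] at hi'
            have h1 := hmax n hn
            have h2 := hOlt n hn
            have h3 : |i - n| = i - n := abs_of_nonneg (by omega)
            omega

-- the joint loop invariant of A's index-collecting loop and B's single pass
def pvInv (l : List (Int × String)) : Prop :=
  (∀ y ∈ (l.foldl pvStepA ([], [])).1, ∃ p ∈ l, p.1 = y) ∧
  (∀ y ∈ (l.foldl pvStepA ([], [])).2, ∃ p ∈ l, p.1 = y) ∧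
  pvMaxOf (l.foldl pvStepB (none, none, none)).1 (l.foldl pvStepA ([], [])).1 ∧
  pvMaxOf (l.foldl pvStepB (none, none, none)).2.1 (l.foldl pvStepA ([], [])).2 ∧
  (l.foldl pvStepB (none, none, none)).2.2
    = (pvDists (l.foldl pvStepA ([], [])).1 (l.foldl pvStepA ([], [])).2).min?

theorem pv_invariant (l : List (Int × String))
    (hinc : l.Pairwise (fun p q => p.1 < q.1)) : pvInv l := by
  induction l using List.reverseRecOn with
  | nil => refine ⟨by simp, by simp, rfl, rfl, by simp [pvDists]⟩
  | append_singleton l p ih =>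
    rw [List.pairwise_append] at hinc
    obtain ⟨h1, _, h3⟩ := hinc
    have hlt : ∀ q ∈ l, q.1 < p.1 := fun q hq => h3 q hq p (by simp)
    obtain ⟨hXmem, hOmem, hmx, hmo, hb⟩ := ih h1
    have hXlt : ∀ y ∈ (l.foldl pvStepA ([], [])).1, y < p.1 := by
      intro y hy
      obtain ⟨q, hq, hqy⟩ := hXmem y hy
      exact hqy ▸ hlt q hq
    have hOlt : ∀ y ∈ (l.foldl pvStepA ([], [])).2, y < p.1 := by
      intro y hy
      obtain ⟨q, hq, hqy⟩ := hOmem y hy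
      exact hqy ▸ hlt q hq
    unfold pvInv
    rw [List.foldl_append, List.foldl_append]
    simp only [List.foldl_cons, List.foldl_nil]
    set S := l.foldl pvStepA ([], []) with hS
    set T := l.foldl pvStepB (none, none, none) with hT
    unfold pvStepA pvStepB
    by_cases hx : p.2 == "x"
    · rw [if_pos hx, if_pos hx]
      refine ⟨?_, ?_, ?_, ?_, ?_⟩
      · intro y hy
        rcases List.mem_append.mp hy with hy' | hy'
        · obtain ⟨q, hq, hqy⟩ := hXmem y hy'
          exact ⟨q, List.mem_append_left _ hq, hqy⟩
        · simp only [List.mem_singleton] at hy'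
          exact ⟨p, by simp, hy'.symm⟩
      · intro y hy
        obtain ⟨q, hq, hqy⟩ := hOmem y hy
        exact ⟨q, List.mem_append_left _ hq, hqy⟩
      · exact ⟨by simp, fun y hy => by
          rcases List.mem_append.mp hy with hy' | hy'
          · exact le_of_lt (hXlt y hy')
          · simp only [List.mem_singleton] at hy'
            omega⟩
      · exact hmo
      · exact pv_min_update S.1 S.2 p.1 T.2.1 T.2.2 hmo hOlt hb
    · rw [if_neg hx, if_neg hx]
      by_cases ho : p.2 == "o"
      · rw [if_pos ho, if_pos ho]
        refine ⟨?_, ?_, ?_, ?_, ?_⟩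
        · intro y hy
          obtain ⟨q, hq, hqy⟩ := hXmem y hy
          exact ⟨q, List.mem_append_left _ hq, hqy⟩
        · intro y hy
          rcases List.mem_append.mp hy with hy' | hy'
          · obtain ⟨q, hq, hqy⟩ := hOmem y hy'
            exact ⟨q, List.mem_append_left _ hq, hqy⟩
          · simp only [List.mem_singleton] at hy'
            exact ⟨p, by simp, hy'.symm⟩
        · exact hmx
        · exact ⟨by simp, fun y hy => by
            rcases List.mem_append.mp hy with hy' | hy'
            · exact le_of_lt (hOlt y hy')
            · simp only [List.mem_singleton] at hy'
              omega⟩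
        · rw [pvDists_comm_min?]
          exact pv_min_update S.2 S.1 p.1 T.1 T.2.2 hmx hXlt (hb.trans (pvDists_comm_min? _ _))
      · rw [if_neg ho, if_neg ho]
        refine ⟨?_, ?_, hmx, hmo, hb⟩
        · intro y hy
          obtain ⟨q, hq, hqy⟩ := hXmem y hy
          exact ⟨q, List.mem_append_left _ hq, hqy⟩
        · intro y hy
          obtain ⟨q, hq, hqy⟩ := hOmem y hy
          exact ⟨q, List.mem_append_left _ hq, hqy⟩

theorem pv_abs (i n : Int) : (if i - n < 0 then (i - n) * (-1) else i - n) = |i - n| := by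
  rcases lt_or_ge (i - n) 0 with h | h
  · rw [if_pos h, abs_of_neg h]; ring
  · rw [if_neg (not_lt.mpr h), abs_of_nonneg h]

theorem pv_step_min (m y : Int) : (if y < m then y else m) = min m y := by
  rw [min_def]
  split_ifs <;> omega

theorem targetTerdekat_spec' (arr : List String) :
    targetTerdekat arr = targetTerdekat_alt arr := by
  have hinv := pv_invariant (PySem.List.enumerate arr)
    (PySem.List.pairwise_lt_enumerate arr 0)
  obtain ⟨_, _, _, _, hb⟩ := hinv
  simp only [targetTerdekat, targetTerdekat_alt]
  set S := (PySem.List.enumerate arr).foldl pvStepA ([], []) with hS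
  set T := (PySem.List.enumerate arr).foldl pvStepB (none, none, none) with hT
  by_cases hempty : S.1 = [] ∨ S.2 = []
  · rw [if_pos hempty]
    have hnil : pvDists S.1 S.2 = [] := (pvDists_eq_nil_iff _ _).mpr hempty
    rw [hnil] at hb
    simp only [List.min?_nil] at hb
    rw [hb]
  · rw [if_neg hempty]
    -- the nested loop builds exactly pvDists S.1 S.2
    have hinner : ∀ (i : Int) (acc : List Int),
        S.2.foldl (fun acc n =>
          let y := i - n
          let y := if y < 0 then (i - n) * (-1) else y
          acc ++ [y]) acc = acc ++ S.2.map (fun n => |i - n|) := by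
      intro i acc
      rw [← PySem.List.foldl_append_singleton_eq_map (fun n => |i - n|) S.2 acc]
      apply PySem.List.foldl_congr_mem
      intro acc n _
      show acc ++ [if i - n < 0 then (i - n) * (-1) else i - n] = acc ++ [|i - n|]
      rw [pv_abs]
    have hxo : S.1.foldl
        (fun acc i => S.2.foldl (fun acc n =>
          let y := i - n
          let y := if y < 0 then (i - n) * (-1) else y
          acc ++ [y]) acc) [] = pvDists S.1 S.2 := by
      rw [show (fun acc i => S.2.foldl (fun acc n =>
          let y := i - n
          let y := if y < 0 then (i - n) * (-1) else y
          acc ++ [y]) acc)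
        = (fun (acc : List Int) i => acc ++ S.2.map (fun n => |i - n|)) from
          funext fun acc => funext fun i => hinner i acc]
      rw [PySem.List.foldl_append_eq_flatMap]
      simp [pvDists]
    rw [hxo]
    have hne : pvDists S.1 S.2 ≠ [] := fun h => hempty ((pvDists_eq_nil_iff _ _).mp h)
    cases hd : pvDists S.1 S.2 with
    | nil => exact absurd hd hne
    | cons h t =>
      rw [hd] at hb
      have hmin : (h :: t).min? = some (t.foldl min h) := rfl
      rw [hmin] at hb
      rw [hb]
      -- goal: (h :: t).foldl (fun m y => if y < m then y else m) h = t.foldl min h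
      simp only [List.foldl_cons]
      rw [show (if h < h then h else h) = h from by simp]
      apply PySem.List.foldl_congr_mem
      intro m y _
      exact pv_step_min m y

-- ===== VERDICT (by name: the statement is the Claim_ definition above) =====
theorem targetTerdekat_spec : Claim_equal_targetTerdekat := by
  intro arr _
  unfold Spec_targetTerdekat
  exact targetTerdekat_spec' arr
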